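-- pv_equiv track=rewrite | github.com/amaganty/Interview-Questions | InterviewQs.py | getElement
-- ===== SOURCE A (Python) =====
-- def getElement(a, n, S) :
--
--     # Sort the array
--     a.sort();
--
--     sum = 0;
--
--     for i in range(n) :
--
--         # If current element
--         # satisfies the condition
--         if (sum + (a[i] * (n - i)) == S) :
--             return a[i];
--
--         sum += a[i];
--
--     # No element found
--     return -1;
-- ===== SOURCE B (Python) =====
-- def getElement(a, n, S):
--     # Binary search instead of a linear scan: after sorting (same in-place
--     # mutation as A), f(i) = sum(a[:i]) + a[i]*(n-i) is non-decreasing in i,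
--     # so bisect the index range [0, n) for an index with f(i) == S.
--     a.sort()
--     lo, hi = 0, n
--     while lo < hi:
--         mid = (lo + hi) // 2
--         f = sum(a[:mid]) + a[mid] * (n - mid)
--         if f == S:
--             return a[mid]
--         if f < S:
--             lo = mid + 1
--         else:
--             hi = mid
--     return -1
-- ===== Notes on version B (the rewrite author's own statement) =====
-- stated objective: alternative
-- what changed: Replaces A's linear scan of the sorted array with a binary search over the index range [0,n), exploiting that f(i) = sum(a[:i]) + a[i]*(n-i) is non-decreasing on a sorted array; ties/plateaus provably return the same element.
-- outside the precondition, e.g. on getElement([0], 2, 0): A returns 0, B raises IndexError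
import Mathlib
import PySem

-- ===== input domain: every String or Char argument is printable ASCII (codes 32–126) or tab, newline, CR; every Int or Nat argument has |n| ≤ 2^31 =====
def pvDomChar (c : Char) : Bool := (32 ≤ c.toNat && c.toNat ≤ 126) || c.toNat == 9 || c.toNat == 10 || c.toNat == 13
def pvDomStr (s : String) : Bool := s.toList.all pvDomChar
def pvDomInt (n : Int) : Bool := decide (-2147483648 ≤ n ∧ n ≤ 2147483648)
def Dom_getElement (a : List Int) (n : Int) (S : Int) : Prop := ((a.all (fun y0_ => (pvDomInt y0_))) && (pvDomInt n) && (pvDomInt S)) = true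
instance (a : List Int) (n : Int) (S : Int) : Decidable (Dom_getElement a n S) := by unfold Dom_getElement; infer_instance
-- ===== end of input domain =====

-- B binary-searches the sorted array instead of scanning it linearly ("alternative");
-- both A and B sort the list in place in Python — the equivalence proved is about the return value.

-- ===== PORT A =====
-- A's for-loop over range(n) with early return; inside Pre_ every index i < n is
-- in range, so s.getD i 0 is exactly Python's a[i], and n equals n.toNat there.
-- fuel = number of remaining iterations (nn at the top call); it only makes the
-- recursion structural and never runs out on the iterations the Python performs
def getElementLoop (s : List Int) (nn : Nat) (S : Int) : Nat → Nat → Int → Int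
  | 0, _, _ => -1
  | fuel + 1, i, sum =>
    if i < nn then
      if sum + s.getD i 0 * ((nn : Int) - (i : Int)) = S then s.getD i 0
      else getElementLoop s nn S fuel (i + 1) (sum + s.getD i 0)
    else -1

def getElement (a : List Int) (n : Int) (S : Int) : Int :=
  getElementLoop (PySem.List.sorted a (fun x => x) false) n.toNat S n.toNat 0 0

-- ===== PORT B =====
-- B's while-loop: binary search on [lo, hi); the loop only runs when n > 0,
-- so n.toNat coincides with Python's n wherever the body executes.
def getElementAltLoop (s : List Int) (nn : Nat) (S : Int) : Nat → Nat → Nat → Int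
  | 0, _, _ => -1
  | fuel + 1, lo, hi =>
    if lo < hi then
    if (s.take ((lo + hi) / 2)).sum
        + s.getD ((lo + hi) / 2) 0 * ((nn : Int) - (((lo + hi) / 2 : Nat) : Int)) = S then
      s.getD ((lo + hi) / 2) 0
    else if (s.take ((lo + hi) / 2)).sum
        + s.getD ((lo + hi) / 2) 0 * ((nn : Int) - (((lo + hi) / 2 : Nat) : Int)) < S then
      getElementAltLoop s nn S fuel ((lo + hi) / 2 + 1) hi
    else getElementAltLoop s nn S fuel lo ((lo + hi) / 2)
    else -1

def getElement_alt (a : List Int) (n : Int) (S : Int) : Int :=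
  getElementAltLoop (PySem.List.sorted a (fun x => x) false) n.toNat S n.toNat 0 n.toNat

-- ===== PRECONDITION & SPEC =====
-- Pre_ excludes n > len(a): there A raises IndexError unless an early index happens to
-- match before the scan runs off the list, and B's bisection itself raises IndexError on
-- those inputs (it probes an out-of-range index), so no return value can be claimed.
def Pre_getElement (a : List Int) (n : Int) (_S : Int) : Prop := n ≤ (a.length : Int)
instance (a : List Int) (n : Int) (S : Int) : Decidable (Pre_getElement a n S) := by
  unfold Pre_getElement; infer_instance

def pvWitness_getElement : List Int × Int × Int := ([3, 1, 2], 3, 6)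

def Spec_getElement (a : List Int) (n : Int) (S : Int) (out : Int) : Prop := out = getElement_alt a n S
instance (a : List Int) (n : Int) (S : Int) (out : Int) : Decidable (Spec_getElement a n S out) := by
  unfold Spec_getElement; infer_instance

-- ===== CLAIM (what is proved, stated in full; the proofs are below) =====
def Claim_equal_getElement : Prop := ∀ (a : List Int) (n : Int) (S : Int), Dom_getElement a n S → Pre_getElement a n S → Spec_getElement a n S (getElement a n S)

-- ===== LEMMAS AND PROOFS =====

-- the probe value both loops compare against S at index i
def fval (s : List Int) (nn : Nat) (i : Nat) : Int :=
  (s.take i).sum + s.getD i 0 * ((nn : Int) - (i : Int))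

theorem take_succ_sum (s : List Int) (i : Nat) (h : i < s.length) :
    (s.take (i + 1)).sum = (s.take i).sum + s.getD i 0 := by
  simp [List.sum_take_succ _ _ h, List.getElem?_eq_getElem h]

theorem getD_mono (s : List Int) (hs : s.Pairwise (· ≤ ·)) {i j : Nat}
    (hij : i ≤ j) (hj : j < s.length) : s.getD i 0 ≤ s.getD j 0 := by
  rcases Nat.eq_or_lt_of_le hij with rfl | hlt
  · exact le_refl _
  · have hi : i < s.length := lt_of_le_of_lt (Nat.le_of_lt hlt) hj
    rw [List.getD_eq_getElem _ _ hi, List.getD_eq_getElem _ _ hj]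
    exact (List.pairwise_iff_getElem.mp hs) i j hi hj hlt

theorem fval_step (s : List Int) (nn : Nat) (i : Nat) (hi : i + 1 < nn)
    (hL : nn ≤ s.length) :
    fval s nn (i + 1) - fval s nn i
      = (s.getD (i + 1) 0 - s.getD i 0) * ((nn : Int) - (i : Int) - 1) := by
  have hlt : i < s.length := by omega
  unfold fval
  rw [take_succ_sum s i hlt]
  push_cast
  ring

theorem fval_mono (s : List Int) (nn : Nat) (hs : s.Pairwise (· ≤ ·))
    (hL : nn ≤ s.length) {i j : Nat} (hij : i ≤ j) (hj : j < nn) :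
    fval s nn i ≤ fval s nn j := by
  induction j with
  | zero => interval_cases i; exact le_refl _
  | succ j ih =>
    rcases Nat.eq_or_lt_of_le hij with rfl | hlt
    · exact le_refl _
    · have hij' : i ≤ j := by omega
      have h1 : fval s nn i ≤ fval s nn j := ih hij' (by omega)
      have h2 := fval_step s nn j hj hL
      have hg : s.getD j 0 ≤ s.getD (j + 1) 0 := getD_mono s hs (by omega) (by omega)
      have hfac : (0 : Int) ≤ (nn : Int) - (j : Int) - 1 := by
        have : (j : Int) + 1 < (nn : Int) := by exact_mod_cast hj
        omega
      nlinarith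
-- plateau: equal probe values at two indices force equal elements
theorem fval_plateau (s : List Int) (nn : Nat) (hs : s.Pairwise (· ≤ ·))
    (hL : nn ≤ s.length) {i j : Nat} (hij : i ≤ j) (hj : j < nn)
    (heq : fval s nn i = fval s nn j) : s.getD i 0 = s.getD j 0 := by
  induction j with
  | zero => interval_cases i; rfl
  | succ j ih =>
    rcases Nat.eq_or_lt_of_le hij with rfl | hlt
    · rfl
    · have hij' : i ≤ j := by omega
      have h1 : fval s nn i ≤ fval s nn j := fval_mono s nn hs hL hij' (by omega)
      have h2 : fval s nn j ≤ fval s nn (j + 1) := fval_mono s nn hs hL (by omega) hj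
      have heqj : fval s nn i = fval s nn j := by omega
      have hstep := fval_step s nn j hj hL
      have hzero : (s.getD (j + 1) 0 - s.getD j 0) * ((nn : Int) - (j : Int) - 1) = 0 := by
        omega
      have hfac : (nn : Int) - (j : Int) - 1 ≠ 0 := by
        have : (j : Int) + 1 < (nn : Int) := by exact_mod_cast hj
        omega
      have hge : s.getD (j + 1) 0 = s.getD j 0 := by
        rcases mul_eq_zero.mp hzero with h | h
        · omega
        · exact absurd h hfac
      rw [ih hij' (by omega) heqj, hge]

theorem loopA_none (s : List Int) (nn : Nat) (S : Int) (hL : nn ≤ s.length) :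
    ∀ d i, nn ≤ i + d → (∀ j, i ≤ j → j < nn → fval s nn j ≠ S) →
      getElementLoop s nn S d i ((s.take i).sum) = -1 := by
  intro d
  induction d with
  | zero => intro i _ _; rfl
  | succ d ih =>
    intro i hd hno
    simp only [getElementLoop]
    by_cases hlt : i < nn
    · rw [if_pos hlt]
      have hne : (s.take i).sum + s.getD i 0 * ((nn : Int) - (i : Int)) ≠ S :=
        hno i (le_refl _) hlt
      rw [if_neg hne]
      have hrec : (s.take i).sum + s.getD i 0 = (s.take (i + 1)).sum :=
        (take_succ_sum s i (by omega)).symm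
      rw [hrec]
      exact ih (i + 1) (by omega) (fun j hji hj => hno j (by omega) hj)
    · rw [if_neg hlt]

theorem loopA_found (s : List Int) (nn : Nat) (S : Int) (hL : nn ≤ s.length)
    (j : Nat) (hj : j < nn) (hfj : fval s nn j = S) :
    ∀ d i, j < i + d → i ≤ j → (∀ k, i ≤ k → k < j → fval s nn k ≠ S) →
      getElementLoop s nn S d i ((s.take i).sum) = s.getD j 0 := by
  intro d
  induction d with
  | zero => intro i hd hij _; omega
  | succ d ih =>
    intro i hd hij hmin
    simp only [getElementLoop]
    rcases Nat.eq_or_lt_of_le hij with rfl | hlt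
    · rw [if_pos hj]
      have hcond : (s.take i).sum + s.getD i 0 * ((nn : Int) - (i : Int)) = S := hfj
      rw [if_pos hcond]
    · have hi : i < nn := by omega
      rw [if_pos hi]
      have hne : (s.take i).sum + s.getD i 0 * ((nn : Int) - (i : Int)) ≠ S :=
        hmin i (le_refl _) hlt
      rw [if_neg hne]
      have hrec : (s.take i).sum + s.getD i 0 = (s.take (i + 1)).sum :=
        (take_succ_sum s i (by omega)).symm
      rw [hrec]
      exact ih (i + 1) (by omega) (by omega) (fun k hk hk' => hmin k (by omega) hk')

theorem loopB_none (s : List Int) (nn : Nat) (S : Int)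
    (hno : ∀ j, j < nn → fval s nn j ≠ S) :
    ∀ d lo hi, hi ≤ nn → getElementAltLoop s nn S d lo hi = -1 := by
  intro d
  induction d with
  | zero => intro lo hi _; rfl
  | succ d ih =>
    intro lo hi hn
    simp only [getElementAltLoop]
    by_cases hlt : lo < hi
    · rw [if_pos hlt]
      have hmid : (lo + hi) / 2 < nn := by omega
      have hne : (s.take ((lo + hi) / 2)).sum
          + s.getD ((lo + hi) / 2) 0 * ((nn : Int) - (((lo + hi) / 2 : Nat) : Int)) ≠ S :=
        hno _ hmid
      rw [if_neg hne]
      by_cases hlo : (s.take ((lo + hi) / 2)).sum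
          + s.getD ((lo + hi) / 2) 0 * ((nn : Int) - (((lo + hi) / 2 : Nat) : Int)) < S
      · rw [if_pos hlo]; exact ih _ hi hn
      · rw [if_neg hlo]; exact ih lo _ (by omega)
    · rw [if_neg hlt]

theorem loopB_found (s : List Int) (nn : Nat) (S : Int) (hs : s.Pairwise (· ≤ ·))
    (hL : nn ≤ s.length) (j : Nat) (hj : j < nn) (hfj : fval s nn j = S) :
    ∀ d lo hi, hi ≤ lo + d → hi ≤ nn → lo ≤ j → j < hi →
      getElementAltLoop s nn S d lo hi = s.getD j 0 := by
  intro d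
  induction d with
  | zero => intro lo hi hd _ hlo hhi; omega
  | succ d ih =>
    intro lo hi hd hn hlo hhi
    have hlt : lo < hi := by omega
    simp only [getElementAltLoop]
    rw [if_pos hlt]
    set mid := (lo + hi) / 2 with hmiddef
    have hmid : mid < nn := by omega
    by_cases heq : (s.take mid).sum + s.getD mid 0 * ((nn : Int) - (mid : Int)) = S
    · rw [if_pos heq]
      -- plateau: fval mid = S = fval j, so the elements agree
      rcases Nat.le_total mid j with hmj | hjm
      · exact fval_plateau s nn hs hL hmj hj (heq.trans hfj.symm)
      · exact (fval_plateau s nn hs hL hjm hmid (hfj.trans heq.symm)).symm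
    · rw [if_neg heq]
      by_cases hlo' : (s.take mid).sum + s.getD mid 0 * ((nn : Int) - (mid : Int)) < S
      · rw [if_pos hlo']
        -- the matching index lies strictly right of mid
        have hjmid : mid < j := by
          by_contra hcon
          have hjm : j ≤ mid := by omega
          have hle : fval s nn j ≤ fval s nn mid := fval_mono s nn hs hL hjm hmid
          rw [hfj] at hle
          exact absurd (lt_of_le_of_lt hle hlo') (lt_irrefl S)
        exact ih (mid + 1) hi (by omega) hn (by omega) hhi
      · rw [if_neg hlo']
        have hS : S < fval s nn mid := by
          rcases lt_or_gt_of_ne (Ne.symm heq) with h | h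
          · exact h
          · exact absurd h hlo'
        -- the matching index lies strictly left of mid
        have hjmid : j < mid := by
          by_contra hcon
          have hmj : mid ≤ j := by omega
          have hge : fval s nn mid ≤ fval s nn j := fval_mono s nn hs hL hmj hj
          rw [hfj] at hge
          exact absurd (lt_of_lt_of_le hS hge) (lt_irrefl S)
        exact ih lo mid (by omega) (by omega) hlo hjmid

-- ===== VERDICT (by name: the statement is the Claim_ definition above) =====
theorem getElement_spec : Claim_equal_getElement := by
  intro a n S _hdom hpre
  unfold Spec_getElement getElement getElement_alt
  set s := PySem.List.sorted a (fun x => x) false with hsdef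
  have hs : s.Pairwise (· ≤ ·) := PySem.List.sorted_pairwise a (fun x => x)
  have hlen : s.length = a.length := by
    rw [hsdef]; exact PySem.List.length_sorted a (fun x => x) false
  have hL : n.toNat ≤ s.length := by
    unfold Pre_getElement at hpre
    omega
  set nn := n.toNat
  by_cases hex : ∃ j, j < nn ∧ fval s nn j = S
  · classical
    obtain ⟨j0, hj0⟩ := hex
    have hexd : ∃ j, j < nn ∧ fval s nn j = S := ⟨j0, hj0⟩
    set j := Nat.find hexd with hjdef
    obtain ⟨hjlt, hjeq⟩ := Nat.find_spec hexd
    have hmin : ∀ k, k < j → ¬(k < nn ∧ fval s nn k = S) := fun k hk => Nat.find_min hexd hk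
    have hA : getElementLoop s nn S nn 0 ((s.take 0).sum) = s.getD j 0 :=
      loopA_found s nn S hL j hjlt hjeq nn 0 (by omega) (Nat.zero_le _)
        (fun k _ hk => fun hc => hmin k hk ⟨by omega, hc⟩)
    have hB : getElementAltLoop s nn S nn 0 nn = s.getD j 0 :=
      loopB_found s nn S hs hL j hjlt hjeq nn 0 nn (by omega) (le_refl _) (Nat.zero_le _) hjlt
    simpa using hA.trans hB.symm
  · push Not at hex
    have hA : getElementLoop s nn S nn 0 ((s.take 0).sum) = -1 :=
      loopA_none s nn S hL nn 0 (by omega) (fun j _ hj => hex j hj)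
    have hB : getElementAltLoop s nn S nn 0 nn = -1 :=
      loopB_none s nn S (fun j hj => hex j hj) nn 0 nn (le_refl _)
    simpa using hA.trans hB.symm
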